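-- pv_equiv track=rewrite | github.com/lucasburgosr/IA-FCE-BACK-TEMP | services/vector_store_service.py | _extraer_preguntas_generadas
-- ===== SOURCE A (Python) =====
-- from typing import List, Dict, Optional, Set
--
-- def _extraer_preguntas_generadas(texto: str) -> List[str]:
--     preguntas = []
--     buffer = ""
--     dentro_de_pregunta = False
--
--     for linea in texto.splitlines():
--         linea = linea.strip()
--
--         if not linea:
--             continue
--
--         if not dentro_de_pregunta and not linea.startswith("\\["):
--             if buffer:
--                 preguntas.append(buffer.strip())
--                 buffer = ""
--             buffer = linea
--             dentro_de_pregunta = True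
--
--         elif linea.startswith("\\["):
--             buffer += "\n" + linea
--             dentro_de_pregunta = True
--
--         elif linea.startswith("\\]"):
--             buffer += "\n" + linea
--             preguntas.append(buffer.strip())
--             buffer = ""
--             dentro_de_pregunta = False
--
--         else:
--             buffer += "\n" + linea
--
--     if buffer:
--         preguntas.append(buffer.strip())
--
--     return preguntas
-- ===== SOURCE B (Python) =====
-- def _extraer_preguntas_generadas(texto):
--     lineas = [l.strip() for l in texto.splitlines() if l.strip()]
--     return ["\n".join(g) for g in _grupos(lineas)]
--
-- def _grupos(lineas):
--     # A question group runs from its first line up to (and including) the first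
--     # LATER line that starts with "\]" (so a "\]" line never closes at index 0).
--     if not lineas:
--         return []
--     cabeza, resto = lineas[0], lineas[1:]
--     cierre = next((i for i, l in enumerate(resto) if l.startswith("\\]")), None)
--     if cierre is None:
--         return [lineas]
--     return [[cabeza] + resto[:cierre + 1]] + _grupos(resto[cierre + 1:])
-- ===== Notes on version B (the rewrite author's own statement) =====
-- stated objective: simpler
-- what changed: B replaces A's one-pass state machine (string buffer + dentro_de_pregunta flag, four branches) by three staged passes: normalize lines (strip, drop empties), recursively split the line list into groups at the first '\]' line after each group start, then join each group with newlines.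
import Mathlib
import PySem

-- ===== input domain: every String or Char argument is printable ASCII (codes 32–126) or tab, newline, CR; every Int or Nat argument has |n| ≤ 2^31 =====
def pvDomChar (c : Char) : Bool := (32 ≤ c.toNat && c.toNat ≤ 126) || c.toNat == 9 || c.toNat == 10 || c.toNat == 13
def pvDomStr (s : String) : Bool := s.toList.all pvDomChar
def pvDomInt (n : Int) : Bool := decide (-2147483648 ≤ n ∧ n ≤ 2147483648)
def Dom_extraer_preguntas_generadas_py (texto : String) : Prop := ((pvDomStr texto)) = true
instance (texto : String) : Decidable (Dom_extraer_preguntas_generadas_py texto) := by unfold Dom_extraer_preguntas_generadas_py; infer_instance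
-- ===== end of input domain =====

-- B replaces A's one-pass buffer/flag state machine by three staged passes: normalize the lines,
-- recursively split them into groups at the first "\]" line after each group start, join each group;
-- objective: simpler decomposition.

-- ===== PORT A =====
-- one iteration of A's for-loop; state = (preguntas, buffer, dentro_de_pregunta)
def pvAStep (st : List String × String × Bool) (linea0 : String) : List String × String × Bool :=
  let preguntas := st.1
  let buffer := st.2.1
  let dentro := st.2.2
  let linea := PySem.Str.strip linea0
  if linea = "" then st
  else if !dentro && !(PySem.Str.startswith linea "\\[") then
    let pb := if buffer ≠ "" then (preguntas ++ [PySem.Str.strip buffer], "") else (preguntas, buffer)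
    (pb.1, linea, true)
  else if PySem.Str.startswith linea "\\[" then
    (preguntas, buffer ++ "\n" ++ linea, true)
  else if PySem.Str.startswith linea "\\]" then
    (preguntas ++ [PySem.Str.strip (buffer ++ "\n" ++ linea)], "", false)
  else
    (preguntas, buffer ++ "\n" ++ linea, dentro)

-- the trailing 'if buffer: preguntas.append(buffer.strip())'
def pvAFinish (st : List String × String × Bool) : List String :=
  if st.2.1 ≠ "" then st.1 ++ [PySem.Str.strip st.2.1] else st.1

def extraer_preguntas_generadas_py (texto : String) : List String :=
  pvAFinish ((PySem.Str.splitlines texto).foldl pvAStep ([], "", false))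

-- ===== PORT B =====
-- B's helper _grupos: head/tail recursion, searching the tail for the first closing "\]" line
-- (next(... enumerate ...) ported as List.findIdx?, which returns the same first index)
def pvGrupos : List String → List (List String)
  | [] => []
  | cabeza :: resto =>
    match resto.findIdx? (fun l => PySem.Str.startswith l "\\]") with
    | none => [cabeza :: resto]
    | some cierre => (cabeza :: resto.take (cierre + 1)) :: pvGrupos (resto.drop (cierre + 1))
termination_by ls => ls.length
decreasing_by simp

def extraer_preguntas_generadas_py_alt (texto : String) : List String :=
  -- lineas = [l.strip() for l in texto.splitlines() if l.strip()]
  let lineas := ((PySem.Str.splitlines texto).filter (fun l => PySem.Str.strip l != "")).map PySem.Str.strip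
  -- return ["\n".join(g) for g in _grupos(lineas)]
  (pvGrupos lineas).map (fun g => PySem.Str.join "\n" g)

-- ===== PRECONDITION & SPEC =====
def Spec_extraer_preguntas_generadas_py (texto : String) (out : List String) : Prop := out = extraer_preguntas_generadas_py_alt texto
instance (texto : String) (out : List String) : Decidable (Spec_extraer_preguntas_generadas_py texto out) := by unfold Spec_extraer_preguntas_generadas_py; infer_instance

-- ===== CLAIM (what is proved, stated in full; the proofs are below) =====
def Claim_equal_extraer_preguntas_generadas_py : Prop := ∀ (texto : String), Dom_extraer_preguntas_generadas_py texto → Spec_extraer_preguntas_generadas_py texto (extraer_preguntas_generadas_py texto)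

-- ===== LEMMAS AND PROOFS =====

-- intermediate (proof-only) machine: one-pass grouping over already-normalized lines;
-- state = (preguntas, grupo)
def pvBStep (st : List String × List String) (linea0 : String) : List String × List String :=
  let preguntas := st.1
  let grupo := st.2
  let linea := PySem.Str.strip linea0
  if linea = "" then st
  else if PySem.Str.startswith linea "\\]" && !grupo.isEmpty then
    (preguntas ++ [PySem.Str.join "\n" (grupo ++ [linea])], [])
  else
    (preguntas, grupo ++ [linea])

def pvBFinish (st : List String × List String) : List String :=
  if st.2.isEmpty then st.1 else st.1 ++ [PySem.Str.join "\n" st.2]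

-- same step for lines that are already stripped and non-empty
def pvBStep' (st : List String × List String) (linea : String) : List String × List String :=
  if PySem.Str.startswith linea "\\]" && !st.2.isEmpty then
    (st.1 ++ [PySem.Str.join "\n" (st.2 ++ [linea])], [])
  else
    (st.1, st.2 ++ [linea])

-- ---------- part 1: A's machine equals pvBStep/pvBFinish (buffer/flag ↔ group list) ----------

-- a char list whose first and last characters (if any) are non-whitespace
def pvNB (cs : List Char) : Prop :=
  (∀ c ∈ cs.head?, PySem.Chars.isspace c = false) ∧ (∀ c ∈ cs.getLast?, PySem.Chars.isspace c = false)

-- the char-level content of "\n".join(grupo)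
def pvJ (grupo : List String) : List Char :=
  PySem.Chars.join ['\n'] (grupo.map String.toList)

-- invariant tying A's (buffer, dentro_de_pregunta) to the grupo list
def pvInv (buffer : String) (dentro : Bool) (grupo : List String) : Prop :=
  (∀ l ∈ grupo, l.toList ≠ [] ∧ pvNB l.toList) ∧
  ((grupo = [] ∧ buffer = "" ∧ dentro = false) ∨
   (grupo ≠ [] ∧ dentro = true ∧
     (buffer.toList = pvJ grupo ∨ buffer.toList = '\n' :: pvJ grupo)))

theorem pvNB_strip (cs : List Char) : pvNB (PySem.Chars.strip cs) := by
  constructor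
  · intro c hc
    have hne : PySem.Chars.strip cs ≠ [] := by intro h; rw [h] at hc; simp at hc
    have hpre : PySem.Chars.strip cs <+: PySem.Chars.lstrip cs := by
      rw [PySem.Chars.strip, PySem.Chars.rstrip]
      rw [← List.reverse_reverse (PySem.Chars.lstrip cs)]
      exact (List.reverse_prefix).mpr (by simp [List.dropWhile_suffix])
    obtain ⟨t, ht⟩ := hpre
    have hh : (PySem.Chars.lstrip cs).head? = some c := by
      rw [← ht, List.head?_append_of_ne_nil _ hne, hc]
    have hne2 : PySem.Chars.lstrip cs ≠ [] := by
      intro h; rw [h] at hh; simp at hh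
    have h3 := List.head_dropWhile_not (p := PySem.Chars.isspace) (l := cs)
      (w := by rwa [PySem.Chars.lstrip] at hne2)
    rw [PySem.Chars.lstrip,
      List.head?_eq_some_head (by rwa [PySem.Chars.lstrip] at hne2)] at hh
    rwa [Option.some.inj hh] at h3
  · intro c hc
    rw [PySem.Chars.strip, PySem.Chars.rstrip, List.getLast?_reverse] at hc
    have hne : (PySem.Chars.lstrip cs).reverse.dropWhile PySem.Chars.isspace ≠ [] := by
      intro h; rw [h] at hc; simp at hc
    have h3 := List.head_dropWhile_not (p := PySem.Chars.isspace)
      (l := (PySem.Chars.lstrip cs).reverse) (w := hne)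
    rw [List.head?_eq_some_head hne] at hc
    rwa [Option.some.inj hc] at h3

theorem pv_strip_of_NB (cs : List Char) (h : pvNB cs) : PySem.Chars.strip cs = cs := by
  obtain ⟨h1, h2⟩ := h
  have hl : PySem.Chars.lstrip cs = cs := by
    cases cs with
    | nil => rfl
    | cons c t => simp [PySem.Chars.lstrip, h1 c (by simp)]
  have hr : PySem.Chars.rstrip cs = cs := by
    rw [PySem.Chars.rstrip]
    cases hrev : cs.reverse with
    | nil => simp at hrev; simp [hrev]
    | cons c t =>
      have : cs.getLast? = some c := by
        rw [← List.head?_reverse]; simp [hrev]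
      rw [List.dropWhile_cons]
      simp [h2 c this, ← hrev]
  rw [PySem.Chars.strip, hl, hr]

theorem pv_strip_cons_newline (cs : List Char) :
    PySem.Chars.strip ('\n' :: cs) = PySem.Chars.strip cs := by
  rw [PySem.Chars.strip, PySem.Chars.strip, PySem.Chars.lstrip, PySem.Chars.lstrip,
    List.dropWhile_cons]
  have : PySem.Chars.isspace '\n' = true := by decide
  simp [this]

theorem pvJ_singleton (l : String) : pvJ [l] = l.toList := by
  simp [pvJ, PySem.Chars.join_singleton]

theorem pvJ_append (grupo : List String) (hg : grupo ≠ []) (l : String) :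
    pvJ (grupo ++ [l]) = pvJ grupo ++ '\n' :: l.toList := by
  induction grupo with
  | nil => exact absurd rfl hg
  | cons a g ih =>
    cases g with
    | nil => simp [pvJ, PySem.Chars.join_cons_cons, PySem.Chars.join_singleton]
    | cons b g' =>
      have h1 : pvJ ((a :: b :: g') ++ [l]) =
          a.toList ++ ['\n'] ++ pvJ ((b :: g') ++ [l]) := by
        simp [pvJ, PySem.Chars.join_cons_cons]
      rw [h1, ih (by simp)]
      simp [pvJ, PySem.Chars.join_cons_cons]

theorem pvJ_ne_nil (grupo : List String) (hg : grupo ≠ [])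
    (h : ∀ l ∈ grupo, l.toList ≠ [] ∧ pvNB l.toList) : pvJ grupo ≠ [] := by
  cases grupo with
  | nil => exact absurd rfl hg
  | cons a g =>
    cases g with
    | nil => rw [pvJ_singleton]; exact (h a (by simp)).1
    | cons b g' => simp [pvJ, PySem.Chars.join_cons_cons]

theorem pvNB_J (grupo : List String) (hg : grupo ≠ [])
    (h : ∀ l ∈ grupo, l.toList ≠ [] ∧ pvNB l.toList) : pvNB (pvJ grupo) := by
  induction grupo with
  | nil => exact absurd rfl hg
  | cons a g ih =>
    cases g with
    | nil => rw [pvJ_singleton]; exact (h a (by simp)).2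
    | cons b g' =>
      have hrec := ih (by simp) (fun l hl => h l (List.mem_cons_of_mem _ hl))
      have hrecne : pvJ (b :: g') ≠ [] :=
        pvJ_ne_nil _ (by simp) (fun l hl => h l (List.mem_cons_of_mem _ hl))
      have hsplit : pvJ (a :: b :: g') = a.toList ++ '\n' :: pvJ (b :: g') := by
        simp [pvJ, PySem.Chars.join_cons_cons]
      constructor
      · intro c hc
        rw [hsplit, List.head?_append_of_ne_nil _ (h a (by simp)).1] at hc
        exact (h a (by simp)).2.1 c hc
      · intro c hc
        rw [hsplit] at hc
        rw [List.getLast?_append_of_ne_nil _ (by simp : ('\n' :: pvJ (b :: g')) ≠ [])] at hc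
        rw [show ('\n' :: pvJ (b :: g')) = ['\n'] ++ pvJ (b :: g') from rfl,
          List.getLast?_append_of_ne_nil _ hrecne] at hc
        exact hrec.2 c hc

-- a string cannot start with two distinct prefixes of equal length
theorem pv_startswith_excl (cs p q : List Char) (hlen : p.length = q.length)
    (hne : p ≠ q) (h : PySem.Chars.startswith cs p = true) :
    PySem.Chars.startswith cs q = false := by
  rw [Bool.eq_false_iff]
  intro h2
  rw [PySem.Chars.startswith_iff] at h h2
  have := List.prefix_of_prefix_length_le h h2 (le_of_eq hlen)
  exact hne (List.IsPrefix.eq_of_length this hlen)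

theorem pv_toList_concat (buffer l : String) :
    (buffer ++ "\n" ++ l).toList = buffer.toList ++ '\n' :: l.toList := by
  simp

theorem pv_main (lines : List String) : ∀ (preg : List String) (buffer : String)
    (dentro : Bool) (grupo : List String), pvInv buffer dentro grupo →
    ((lines.foldl pvAStep (preg, buffer, dentro)).1 = (lines.foldl pvBStep (preg, grupo)).1 ∧
     pvInv (lines.foldl pvAStep (preg, buffer, dentro)).2.1
           (lines.foldl pvAStep (preg, buffer, dentro)).2.2
           (lines.foldl pvBStep (preg, grupo)).2) := by
  induction lines with
  | nil => intro preg buffer dentro grupo hinv; exact ⟨rfl, hinv⟩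
  | cons x rest ih =>
    intro preg buffer dentro grupo hinv
    simp only [List.foldl_cons]
    by_cases hl : PySem.Str.strip x = ""
    · have ha : pvAStep (preg, buffer, dentro) x = (preg, buffer, dentro) := by
        simp [pvAStep, hl]
      have hb : pvBStep (preg, grupo) x = (preg, grupo) := by
        simp [pvBStep, hl]
      rw [ha, hb]; exact ih preg buffer dentro grupo hinv
    · have hlt : (PySem.Str.strip x).toList ≠ [] := by
        intro hh; exact hl (String.toList_inj.mp (by simpa using hh))
      have hclean : pvNB (PySem.Str.strip x).toList := by
        rw [PySem.Str.toList_strip]; exact pvNB_strip _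
      obtain ⟨hall, hcase⟩ := hinv
      rcases hcase with ⟨hg0, hb0, hd0⟩ | ⟨hgne, hd1, hbuf⟩
      · subst hg0; subst hb0; subst hd0
        have hb : pvBStep (preg, ([] : List String)) x = (preg, [PySem.Str.strip x]) := by
          simp [pvBStep, hl]
        have hallx : ∀ m ∈ [PySem.Str.strip x], m.toList ≠ [] ∧ pvNB m.toList := by
          intro m hm; rw [List.mem_singleton] at hm; subst hm; exact ⟨hlt, hclean⟩
        by_cases hsw : PySem.Chars.startswith (PySem.Chars.strip x.toList) ['\\', '['] = true
        · have ha : pvAStep (preg, "", false) x =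
              (preg, "" ++ "\n" ++ PySem.Str.strip x, true) := by
            simp [pvAStep, hl, hsw]
          rw [ha, hb]
          exact ih _ _ _ _ ⟨hallx, Or.inr ⟨by simp, rfl,
            Or.inr (by rw [pvJ_singleton, pv_toList_concat]; simp)⟩⟩
        · rw [Bool.not_eq_true] at hsw
          have ha : pvAStep (preg, "", false) x = (preg, PySem.Str.strip x, true) := by
            simp [pvAStep, hl, hsw]
          rw [ha, hb]
          exact ih _ _ _ _ ⟨hallx, Or.inr ⟨by simp, rfl, Or.inl (by rw [pvJ_singleton])⟩⟩
      · subst hd1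
        have hallx : ∀ m ∈ grupo ++ [PySem.Str.strip x], m.toList ≠ [] ∧ pvNB m.toList := by
          intro m hm
          rcases List.mem_append.mp hm with hm | hm
          · exact hall m hm
          · rw [List.mem_singleton] at hm; subst hm; exact ⟨hlt, hclean⟩
        have hbufx : (buffer ++ "\n" ++ PySem.Str.strip x).toList = pvJ (grupo ++ [PySem.Str.strip x]) ∨
            (buffer ++ "\n" ++ PySem.Str.strip x).toList = '\n' :: pvJ (grupo ++ [PySem.Str.strip x]) := by
          rw [pv_toList_concat, pvJ_append grupo hgne]
          rcases hbuf with hbuf | hbuf <;> rw [hbuf] <;> simp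
        by_cases hsw2 : PySem.Chars.startswith (PySem.Chars.strip x.toList) ['\\', ']'] = true
        · -- the closing line: both sides emit, and the emitted strings agree
          have hsw1 : PySem.Chars.startswith (PySem.Chars.strip x.toList) ['\\', '['] = false :=
            pv_startswith_excl _ ['\\', ']'] ['\\', '['] (by decide) (by decide) hsw2
          have ha : pvAStep (preg, buffer, true) x =
              (preg ++ [PySem.Str.strip (buffer ++ "\n" ++ PySem.Str.strip x)], "", false) := by
            simp [pvAStep, hl, hsw1, hsw2]
          have hgeF : grupo.isEmpty = false := by
            cases grupo with
            | nil => exact absurd rfl hgne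
            | cons a g => rfl
          have hb : pvBStep (preg, grupo) x =
              (preg ++ [PySem.Str.join "\n" (grupo ++ [PySem.Str.strip x])], []) := by
            simp [pvBStep, hl, hsw2, hgeF]
          have hkey : PySem.Str.strip (buffer ++ "\n" ++ PySem.Str.strip x) =
              PySem.Str.join "\n" (grupo ++ [PySem.Str.strip x]) := by
            apply String.toList_inj.mp
            rw [PySem.Str.toList_strip, PySem.Str.toList_join]
            have hNBJ := pvNB_J _ (by simp : grupo ++ [PySem.Str.strip x] ≠ []) hallx
            have hJ : PySem.Chars.join "\n".toList
                ((grupo ++ [PySem.Str.strip x]).map String.toList) =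
                pvJ (grupo ++ [PySem.Str.strip x]) := rfl
            rw [hJ]
            rcases hbufx with hx | hx
            · rw [hx]; exact pv_strip_of_NB _ hNBJ
            · rw [hx, pv_strip_cons_newline]; exact pv_strip_of_NB _ hNBJ
          rw [ha, hb, hkey]
          exact ih _ _ _ _ ⟨by simp, Or.inl ⟨rfl, rfl, rfl⟩⟩
        · -- a continuation line (whether or not it starts with "\["): both sides append
          rw [Bool.not_eq_true] at hsw2
          have ha : pvAStep (preg, buffer, true) x =
              (preg, buffer ++ "\n" ++ PySem.Str.strip x, true) := by
            by_cases hsw1 : PySem.Chars.startswith (PySem.Chars.strip x.toList) ['\\', '['] = true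
            · simp [pvAStep, hl, hsw1]
            · rw [Bool.not_eq_true] at hsw1
              simp [pvAStep, hl, hsw1, hsw2]
          have hb : pvBStep (preg, grupo) x = (preg, grupo ++ [PySem.Str.strip x]) := by
            simp [pvBStep, hl, hsw2]
          rw [ha, hb]
          exact ih _ _ _ _ ⟨hallx, Or.inr ⟨by simp, rfl, hbufx⟩⟩

theorem pv_A_eq_fold (texto : String) :
    extraer_preguntas_generadas_py texto =
      pvBFinish ((PySem.Str.splitlines texto).foldl pvBStep ([], [])) := by
  unfold extraer_preguntas_generadas_py
  obtain ⟨h1, hall, hcase⟩ :=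
    pv_main (PySem.Str.splitlines texto) [] "" false []
      ⟨by simp, Or.inl ⟨rfl, rfl, rfl⟩⟩
  rcases hcase with ⟨hg0, hb0, _⟩ | ⟨hgne, _, hbuf⟩
  · rw [pvAFinish, pvBFinish, hb0, hg0]
    simpa using h1
  · have hJne : pvJ ((PySem.Str.splitlines texto).foldl pvBStep ([], [])).2 ≠ [] :=
      pvJ_ne_nil _ hgne hall
    have hbne : ((PySem.Str.splitlines texto).foldl pvAStep ([], "", false)).2.1 ≠ "" := by
      intro hh
      rcases hbuf with hx | hx
      · rw [hh] at hx; simp at hx; exact hJne hx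
      · rw [hh] at hx; simp at hx
    have hgeF : (((PySem.Str.splitlines texto).foldl pvBStep ([], [])).2).isEmpty = false := by
      cases hgl : ((PySem.Str.splitlines texto).foldl pvBStep ([], [])).2 with
      | nil => exact absurd hgl hgne
      | cons a g => rfl
    have hkey : PySem.Str.strip ((PySem.Str.splitlines texto).foldl pvAStep ([], "", false)).2.1 =
        PySem.Str.join "\n" ((PySem.Str.splitlines texto).foldl pvBStep ([], [])).2 := by
      apply String.toList_inj.mp
      rw [PySem.Str.toList_strip, PySem.Str.toList_join]
      have hNBJ := pvNB_J _ hgne hall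
      have hJ : PySem.Chars.join "\n".toList
          ((((PySem.Str.splitlines texto).foldl pvBStep ([], [])).2).map String.toList) =
          pvJ (((PySem.Str.splitlines texto).foldl pvBStep ([], [])).2) := rfl
      rw [hJ]
      rcases hbuf with hx | hx
      · rw [hx]; exact pv_strip_of_NB _ hNBJ
      · rw [hx, pv_strip_cons_newline]; exact pv_strip_of_NB _ hNBJ
    rw [pvAFinish, pvBFinish, if_pos hbne, hgeF, if_neg (by simp : ¬ (false = true)), h1, hkey]

-- ---------- part 2: the one-pass fold equals B's staged passes ----------

-- normalization: folding pvBStep over raw lines = folding pvBStep' over the normalized lines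
theorem pv_fold_norm (lines : List String) : ∀ (st : List String × List String),
    lines.foldl pvBStep st =
      ((lines.filter (fun l => PySem.Str.strip l != "")).map PySem.Str.strip).foldl pvBStep' st := by
  induction lines with
  | nil => intro st; rfl
  | cons x rest ih =>
    intro st
    by_cases hl : PySem.Str.strip x = ""
    · have : pvBStep st x = st := by simp [pvBStep, hl]
      simp [hl, this, ih]
    · have hstep : pvBStep st x = pvBStep' st (PySem.Str.strip x) := by
        simp [pvBStep, pvBStep', hl]
      simp [hl, hstep, ih]

-- accumulation without a flush: no line of seg closes
theorem pv_seg (seg : List String) : ∀ (preg grupo : List String), grupo ≠ [] →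
    (∀ l ∈ seg, PySem.Str.startswith l "\\]" = false) →
    seg.foldl pvBStep' (preg, grupo) = (preg, grupo ++ seg) := by
  induction seg with
  | nil => intro preg grupo _ _; simp
  | cons x rest ih =>
    intro preg grupo hg hno
    have hx := hno x (by simp)
    have hx' : PySem.Chars.startswith x.toList ['\\', ']'] = false := hx
    have hstep : pvBStep' (preg, grupo) x = (preg, grupo ++ [x]) := by
      simp [pvBStep', hx']
    rw [List.foldl_cons, hstep,
      ih preg (grupo ++ [x]) (by simp) (fun l hl => hno l (by simp [hl]))]
    simp

-- the one-pass fold from the empty state computes exactly the joined groups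
theorem pv_fold_grupos (n : Nat) : ∀ (ls : List String), ls.length ≤ n → ∀ (preg : List String),
    pvBFinish (ls.foldl pvBStep' (preg, [])) =
      preg ++ (pvGrupos ls).map (fun g => PySem.Str.join "\n" g) := by
  induction n with
  | zero =>
    intro ls hls preg
    have : ls = [] := List.eq_nil_of_length_eq_zero (Nat.le_zero.mp hls)
    subst this
    simp [pvBFinish, pvGrupos]
  | succ n ih =>
    intro ls hls preg
    cases ls with
    | nil => simp [pvBFinish, pvGrupos]
    | cons cabeza resto =>
      have hstep : pvBStep' (preg, ([] : List String)) cabeza = (preg, [cabeza]) := by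
        simp [pvBStep']
      cases hfind : resto.findIdx? (fun l => PySem.Str.startswith l "\\]") with
      | none =>
        have hno : ∀ l ∈ resto, PySem.Str.startswith l "\\]" = false := by
          intro l hl
          simpa using List.findIdx?_eq_none_iff.mp hfind l hl
        rw [pvGrupos, hfind, List.foldl_cons, hstep, pv_seg resto preg [cabeza] (by simp) hno]
        simp [pvBFinish]
      | some cierre =>
        obtain ⟨hlt, hd, hprev⟩ := List.findIdx?_eq_some_iff_getElem.mp hfind
        have hno : ∀ l ∈ resto.take cierre, PySem.Str.startswith l "\\]" = false := by
          intro l hl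
          obtain ⟨j, hj, hjl⟩ := List.mem_iff_getElem.mp hl
          have hjc : j < cierre := lt_of_lt_of_le hj (by simp)
          have := hprev j hjc
          rw [List.getElem_take] at hjl
          subst hjl
          simpa using this
        have hsplitseg : resto = resto.take cierre ++ resto[cierre] :: resto.drop (cierre + 1) := by
          conv_lhs => rw [← List.take_append_drop cierre resto]
          rw [List.drop_eq_getElem_cons hlt]
        have htake : resto.take (cierre + 1) = resto.take cierre ++ [resto[cierre]] := by
          rw [List.take_add_one, List.getElem?_eq_getElem hlt]
          rfl
        have hflush : pvBStep' (preg, cabeza :: resto.take cierre) resto[cierre] =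
            (preg ++ [PySem.Str.join "\n" (cabeza :: resto.take (cierre + 1))], []) := by
          unfold pvBStep'
          rw [hd]
          rw [if_pos (by simp), htake]
          rfl
        have hrec := ih (resto.drop (cierre + 1))
          (le_trans (by simp) (Nat.le_of_succ_le_succ hls))
          (preg ++ [PySem.Str.join "\n" (cabeza :: resto.take (cierre + 1))])
        calc pvBFinish ((cabeza :: resto).foldl pvBStep' (preg, []))
            = pvBFinish ((resto.drop (cierre + 1)).foldl pvBStep'
                (preg ++ [PySem.Str.join "\n" (cabeza :: resto.take (cierre + 1))], [])) := by
              conv_lhs => rw [List.foldl_cons, hstep, hsplitseg]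
              rw [List.foldl_append, pv_seg (resto.take cierre) preg [cabeza] (by simp) hno]
              simp only [List.singleton_append]
              rw [List.foldl_cons, hflush]
          _ = preg ++ (pvGrupos (cabeza :: resto)).map (fun g => PySem.Str.join "\n" g) := by
              rw [hrec, pvGrupos, hfind]
              simp

-- ===== VERDICT (by name: the statement is the Claim_ definition above) =====
theorem extraer_preguntas_generadas_py_spec : Claim_equal_extraer_preguntas_generadas_py := by
  intro texto _
  unfold Spec_extraer_preguntas_generadas_py extraer_preguntas_generadas_py_alt
  rw [pv_A_eq_fold, pv_fold_norm, pv_fold_grupos _ _ (le_refl _)]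
  simp
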